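-- pv_equiv track=rewrite | github.com/miliar/Code_Jam_Webscraper | solutions_python/Problem_53/1034.py | dosnap
-- ===== SOURCE A (Python) =====
-- import math
--
-- def dosnap(chain):
-- 	l = len(chain)
-- 	# p is the last snapper that has power
-- 	p=-1
-- 	while(p < l-1 and chain[p+1] == 1):
-- 		p += 1
--
-- 	#toggle everyone that has power plus the one after the last
-- 	for i in range(p+1,-1,-1):
-- 		if( i < l ):
-- 			chain[i] = int(math.fabs(chain[i]-1))
--
-- 	return p+1
-- ===== SOURCE B (Python) =====
-- def dosnap(chain):
--     # Return value only: the index of the first element that is not 1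
--     # (= number of leading 1s); A additionally mutates the list in place.
--     return next((i for i, x in enumerate(chain) if x != 1), len(chain))
-- ===== Notes on version B (the rewrite author's own statement) =====
-- stated objective: simpler
-- what changed: A finds the leading-1 prefix with a while loop and then toggles it with a second backward for loop before returning p+1; B observes the return value is just the index of the first non-1 element and computes it in one generator scan with no second pass and no mutation.
import Mathlib
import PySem

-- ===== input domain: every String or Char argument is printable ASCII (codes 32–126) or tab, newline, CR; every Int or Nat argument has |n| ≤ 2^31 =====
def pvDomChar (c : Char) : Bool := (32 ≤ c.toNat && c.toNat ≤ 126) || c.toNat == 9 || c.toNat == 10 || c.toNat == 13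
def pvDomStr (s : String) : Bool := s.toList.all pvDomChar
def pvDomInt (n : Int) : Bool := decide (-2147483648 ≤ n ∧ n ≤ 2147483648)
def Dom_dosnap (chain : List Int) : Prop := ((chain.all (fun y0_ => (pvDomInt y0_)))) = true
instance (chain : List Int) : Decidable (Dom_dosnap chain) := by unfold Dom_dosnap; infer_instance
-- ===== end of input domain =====

-- B computes the return value (index of the first non-1 element) in one scan;
-- equivalence is about the RETURN value only: A mutates its list argument, B does not.
-- ===== PORT A =====
-- while(p < l-1 and chain[p+1] == 1): p += 1
def dosnapWhile (chain : List Int) (l p : Int) : Int :=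
  if h : p < l - 1 ∧ PySem.List.pyGet? chain (p + 1) = some 1 then
    dosnapWhile chain l (p + 1)
  else p
termination_by (l - 1 - p).toNat
decreasing_by omega

def dosnap (chain : List Int) : Int :=
  let l : Int := chain.length
  let p := dosnapWhile chain l (-1)
  -- for i in range(p+1,-1,-1): if i < l: chain[i] = int(math.fabs(chain[i]-1))
  -- (int(math.fabs(x-1)) = |x-1| on these ints; the mutated list is not returned)
  let _chain := (PySem.List.pyRange (p + 1) (-1) (-1)).foldl
    (fun c i => if i < l then c.set i.toNat (|((PySem.List.pyGet? c i).getD 0) - 1|) else c) chain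
  p + 1

-- ===== PORT B =====
-- next((i for i, x in enumerate(chain) if x != 1), len(chain))
def dosnapFirst : List Int → Nat → Option Nat
  | [], _ => none
  | x :: xs, i => if x ≠ 1 then some i else dosnapFirst xs (i + 1)

def dosnap_alt (chain : List Int) : Int :=
  match dosnapFirst chain 0 with
  | some i => (i : Int)
  | none => (chain.length : Int)

-- ===== PRECONDITION & SPEC =====
def Spec_dosnap (chain : List Int) (out : Int) : Prop := out = dosnap_alt chain
instance (chain : List Int) (out : Int) : Decidable (Spec_dosnap chain out) := by unfold Spec_dosnap; infer_instance

-- ===== CLAIM (what is proved, stated in full; the proofs are below) =====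
def Claim_equal_dosnap : Prop := ∀ (chain : List Int), Dom_dosnap chain → Spec_dosnap chain (dosnap chain)

-- ===== LEMMAS AND PROOFS =====
-- count of leading 1s, the common value both ports compute
def cnt : List Int → Int
  | [] => 0
  | x :: xs => if x = 1 then 1 + cnt xs else 0

theorem first_eq_cnt (xs : List Int) : ∀ (n : Nat),
    (match dosnapFirst xs n with
     | some i => (i : Int)
     | none => ((n + xs.length : Nat) : Int)) = n + cnt xs := by
  induction xs with
  | nil => intro n; simp [dosnapFirst, cnt]
  | cons x xs ih =>
    intro n
    by_cases hx : x = 1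
    · have := ih (n + 1)
      simp [dosnapFirst, cnt, hx] at this ⊢
      cases hfd : dosnapFirst xs (n + 1) <;> rw [hfd] at this <;> simp at this ⊢ <;> omega
    · simp [dosnapFirst, cnt, hx]

theorem alt_eq_cnt (chain : List Int) : dosnap_alt chain = cnt chain := by
  have := first_eq_cnt chain 0
  simp at this
  simpa [dosnap_alt] using this

theorem while_eq_cnt (chain : List Int) : ∀ (k n : Nat), n ≤ chain.length →
    chain.length - n ≤ k →
    dosnapWhile chain chain.length ((n : Int) - 1) = (n : Int) - 1 + cnt (chain.drop n) := by
  intro k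
  induction k with
  | zero =>
    intro n hn hk
    have hn' : n = chain.length := by omega
    rw [dosnapWhile]
    simp only [hn']
    rw [dif_neg (by omega)]
    simp [cnt]
  | succ k ih =>
    intro n hn hk
    by_cases hlt : n < chain.length
    · have hget : PySem.List.pyGet? chain ((n : Int) - 1 + 1) = some chain[n] := by
        simp [PySem.List.pyGet?, PySem.List.pyIdx?, hlt]
      have hdrop : chain.drop n = chain[n] :: chain.drop (n + 1) :=
        List.drop_eq_getElem_cons hlt
      by_cases h1 : chain[n] = (1 : Int)
      · rw [dosnapWhile, dif_pos ⟨by omega, by rw [hget, h1]⟩]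
        have := ih (n + 1) (by omega) (by omega)
        rw [show (n : Int) - 1 + 1 = ((n + 1 : Nat) : Int) - 1 by push_cast; ring, this,
          hdrop]
        simp [cnt, h1]
        ring
      · rw [dosnapWhile, dif_neg (by rw [hget]; intro ⟨_, h⟩; exact h1 (by simpa using h)),
          hdrop]
        simp [cnt, h1]
    · have hn' : n = chain.length := by omega
      rw [dosnapWhile]
      simp only [hn']
      rw [dif_neg (by omega)]
      simp [cnt]

-- ===== VERDICT (by name: the statement is the Claim_ definition above) =====
theorem dosnap_spec : Claim_equal_dosnap := by
  intro chain _
  unfold Spec_dosnap dosnap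
  rw [alt_eq_cnt]
  have := while_eq_cnt chain chain.length 0 (by omega) (by omega)
  simp at this
  simp [this]
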